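-- pv_equiv track=rewrite | github.com/MrSanZz/LucyNetwork | lucy.py | detect_break_of_structure
-- ===== SOURCE A (Python) =====
-- def detect_break_of_structure(highs, lows, pivot_window=3):
--     structure = []
--     for i in range(pivot_window, len(highs)-pivot_window):
--         window_high = max(highs[i-pivot_window:i+pivot_window+1])
--         window_low = min(lows[i-pivot_window:i+pivot_window+1])
--         if highs[i] == window_high:
--             structure.append(('HH', i, highs[i]))
--         if lows[i] == window_low:
--             structure.append(('LL', i, lows[i]))
--     if len(structure) >= 2:
--         prev, curr = structure[-2], structure[-1]
--         if prev[0]=='HH' and curr[0]=='LL': return 'CHoCH'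
--         if prev[0]=='LL' and curr[0]=='HH': return 'BOS'
--     return None
-- ===== SOURCE B (Python) =====
-- def detect_break_of_structure(highs, lows, pivot_window=3):
--     # Backward scan with early exit: find the last two pivot events directly,
--     # without building the full structure list or computing window max/min.
--     last = None  # tag of the most recent (later) event seen so far
--     for i in reversed(range(pivot_window, len(highs) - pivot_window)):
--         lo, hi = i - pivot_window, i + pivot_window + 1
--         # at index i the forward scan records HH then LL; backward, LL comes first
--         tags = []
--         if all(x >= lows[i] for x in lows[lo:hi]):
--             tags.append('LL')
--         if all(x <= highs[i] for x in highs[lo:hi]):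
--             tags.append('HH')
--         for tag in tags:
--             if last is None:
--                 last = tag
--             else:
--                 prev, curr = tag, last
--                 if prev == 'HH' and curr == 'LL':
--                     return 'CHoCH'
--                 if prev == 'LL' and curr == 'HH':
--                     return 'BOS'
--                 return None
--     return None
-- ===== Notes on version B (the rewrite author's own statement) =====
-- stated objective: alternative
-- what changed: B scans the index range backward with early exit, classifying each candidate pivot by an all-elements comparison instead of computing window max/min, and stops as soon as the last two pivot events are found instead of building the whole structure list.
import Mathlib
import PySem

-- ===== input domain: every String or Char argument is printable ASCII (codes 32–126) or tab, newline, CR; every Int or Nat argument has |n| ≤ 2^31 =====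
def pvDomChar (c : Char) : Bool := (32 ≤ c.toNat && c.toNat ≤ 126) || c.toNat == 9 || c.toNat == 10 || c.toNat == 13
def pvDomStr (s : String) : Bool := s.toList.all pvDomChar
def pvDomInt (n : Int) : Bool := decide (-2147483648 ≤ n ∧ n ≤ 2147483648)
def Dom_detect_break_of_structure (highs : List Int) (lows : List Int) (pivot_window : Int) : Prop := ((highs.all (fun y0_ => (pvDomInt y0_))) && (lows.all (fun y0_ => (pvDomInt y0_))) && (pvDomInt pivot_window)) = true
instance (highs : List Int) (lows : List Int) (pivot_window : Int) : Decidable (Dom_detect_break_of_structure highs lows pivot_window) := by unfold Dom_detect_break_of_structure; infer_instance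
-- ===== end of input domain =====

-- B replaces A's forward structure-list build (window max/min per index) by a backward
-- early-exit scan that stops at the last two pivot events; same results, no speed claim.

-- ===== PORT A =====
def detect_break_of_structure (highs : List Int) (lows : List Int) (pivot_window : Int) : Option String :=
  let structure_ :=
    (PySem.List.pyRange pivot_window ((highs.length : Int) - pivot_window) 1).foldl
      (fun acc i =>
        -- under Pre_ the two slices are nonempty, so max?/min? are `some`; getD 0 is never used
        let window_high := (PySem.List.max? (PySem.List.slice highs (some (i - pivot_window)) (some (i + pivot_window + 1))) (fun y => y)).getD 0
        let window_low := (PySem.List.min? (PySem.List.slice lows (some (i - pivot_window)) (some (i + pivot_window + 1))) (fun y => y)).getD 0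
        let acc := if PySem.List.pyGetD highs i 0 = window_high then acc ++ [(("HH" : String), i, PySem.List.pyGetD highs i 0)] else acc
        if PySem.List.pyGetD lows i 0 = window_low then acc ++ [(("LL" : String), i, PySem.List.pyGetD lows i 0)] else acc)
      []
  if 2 ≤ structure_.length then
    let prev := PySem.List.pyGetD structure_ (-2) ("", 0, 0)
    let curr := PySem.List.pyGetD structure_ (-1) ("", 0, 0)
    if prev.1 = "HH" ∧ curr.1 = "LL" then some "CHoCH"
    else if prev.1 = "LL" ∧ curr.1 = "HH" then some "BOS"
    else none
  else none

-- ===== PORT B =====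
-- inner `for tag in tags` loop of Source B: Sum.inl r = early `return r`, Sum.inr last = loop finished
def dbosTags : List String → Option String → Sum (Option String) (Option String)
  | [], last => Sum.inr last
  | t :: ts, none => dbosTags ts (some t)
  | t :: _, some c =>
      Sum.inl (if t = "HH" ∧ c = "LL" then some "CHoCH"
               else if t = "LL" ∧ c = "HH" then some "BOS"
               else none)

-- backward scan over the (already reversed) index list, carrying the tag of the latest event
def dbosGo (highs : List Int) (lows : List Int) (pw : Int) : List Int → Option String → Option String
  | [], _ => none
  | i :: rest, last =>
      let lo := i - pw
      let hi := i + pw + 1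
      let tags :=
        (if (PySem.List.slice lows (some lo) (some hi)).all (fun x => PySem.List.pyGetD lows i 0 ≤ x) then [("LL" : String)] else [])
        ++ (if (PySem.List.slice highs (some lo) (some hi)).all (fun x => x ≤ PySem.List.pyGetD highs i 0) then [("HH" : String)] else [])
      match dbosTags tags last with
      | Sum.inl r => r
      | Sum.inr last' => dbosGo highs lows pw rest last'

def detect_break_of_structure_alt (highs : List Int) (lows : List Int) (pivot_window : Int) : Option String :=
  dbosGo highs lows pivot_window
    (PySem.List.pyRange pivot_window ((highs.length : Int) - pivot_window) 1).reverse none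

-- ===== PRECONDITION & SPEC =====
-- Pre_ is exactly the set of inputs on which A returns: a negative pivot_window always makes the
-- loop reach index len(highs) (IndexError), and a nonempty scan range needs lows to reach index
-- len(highs)-pivot_window-1 (else IndexError/ValueError on the lows access/min).
def Pre_detect_break_of_structure (highs : List Int) (lows : List Int) (pivot_window : Int) : Prop :=
  0 ≤ pivot_window ∧
  (2 * pivot_window < (highs.length : Int) → (highs.length : Int) - pivot_window ≤ (lows.length : Int))
instance (highs : List Int) (lows : List Int) (pivot_window : Int) : Decidable (Pre_detect_break_of_structure highs lows pivot_window) := by unfold Pre_detect_break_of_structure; infer_instance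
def pvWitness_detect_break_of_structure : List Int × List Int × Int := ([1, 5, 2, 0, 1], [0, 4, 1, -1, 0], 1)

def Spec_detect_break_of_structure (highs : List Int) (lows : List Int) (pivot_window : Int) (out : Option String) : Prop := out = detect_break_of_structure_alt highs lows pivot_window
instance (highs : List Int) (lows : List Int) (pivot_window : Int) (out : Option String) : Decidable (Spec_detect_break_of_structure highs lows pivot_window out) := by unfold Spec_detect_break_of_structure; infer_instance

-- ===== CLAIM (what is proved, stated in full; the proofs are below) =====
def Claim_equal_detect_break_of_structure : Prop := ∀ (highs : List Int) (lows : List Int) (pivot_window : Int), Dom_detect_break_of_structure highs lows pivot_window → Pre_detect_break_of_structure highs lows pivot_window → Spec_detect_break_of_structure highs lows pivot_window (detect_break_of_structure highs lows pivot_window)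

-- ===== LEMMAS AND PROOFS =====

-- per-index events of A's loop body
def dbosE (highs : List Int) (lows : List Int) (pw : Int) (i : Int) : List (String × Int × Int) :=
  (if PySem.List.pyGetD highs i 0 = (PySem.List.max? (PySem.List.slice highs (some (i - pw)) (some (i + pw + 1))) (fun y => y)).getD 0
   then [(("HH" : String), i, PySem.List.pyGetD highs i 0)] else [])
  ++ (if PySem.List.pyGetD lows i 0 = (PySem.List.min? (PySem.List.slice lows (some (i - pw)) (some (i + pw + 1))) (fun y => y)).getD 0
      then [(("LL" : String), i, PySem.List.pyGetD lows i 0)] else [])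

-- per-index tags of B's loop body
def dbosT (highs : List Int) (lows : List Int) (pw : Int) (i : Int) : List String :=
  (if (PySem.List.slice lows (some (i - pw)) (some (i + pw + 1))).all (fun x => PySem.List.pyGetD lows i 0 ≤ x) then [("LL" : String)] else [])
  ++ (if (PySem.List.slice highs (some (i - pw)) (some (i + pw + 1))).all (fun x => x ≤ PySem.List.pyGetD highs i 0) then [("HH" : String)] else [])

-- answer from the reversed tag stream (curr first, then prev)
def dbosH2 (c : String) : List String → Option String
  | [] => none
  | p :: _ => if p = "HH" ∧ c = "LL" then some "CHoCH"
              else if p = "LL" ∧ c = "HH" then some "BOS"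
              else none

def dbosH : List String → Option String
  | [] => none
  | c :: s => dbosH2 c s

theorem dbosGo_some (highs lows : List Int) (pw : Int) (L : List Int) (c : String) :
    dbosGo highs lows pw L (some c) = dbosH2 c (L.flatMap (dbosT highs lows pw)) := by
  induction L with
  | nil => rfl
  | cons i rest ih =>
      simp only [dbosGo, List.flatMap_cons]
      by_cases hl : (PySem.List.slice lows (some (i - pw)) (some (i + pw + 1))).all (fun x => PySem.List.pyGetD lows i 0 ≤ x) = true <;>
      by_cases hh : (PySem.List.slice highs (some (i - pw)) (some (i + pw + 1))).all (fun x => x ≤ PySem.List.pyGetD highs i 0) = true <;>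
      simp [dbosT, hl, hh, dbosTags, dbosH2, ih]

theorem dbosGo_none (highs lows : List Int) (pw : Int) (L : List Int) :
    dbosGo highs lows pw L none = dbosH (L.flatMap (dbosT highs lows pw)) := by
  induction L with
  | nil => rfl
  | cons i rest ih =>
      simp only [dbosGo, List.flatMap_cons]
      by_cases hl : (PySem.List.slice lows (some (i - pw)) (some (i + pw + 1))).all (fun x => PySem.List.pyGetD lows i 0 ≤ x) = true <;>
      by_cases hh : (PySem.List.slice highs (some (i - pw)) (some (i + pw + 1))).all (fun x => x ≤ PySem.List.pyGetD highs i 0) = true <;>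
      simp [dbosT, hl, hh, dbosTags, dbosH, dbosH2, ih, dbosGo_some]

-- A's loop body appends exactly the per-index events
theorem dbosStep (highs lows : List Int) (pw : Int) (acc : List (String × Int × Int)) (i : Int) :
    (let window_high := (PySem.List.max? (PySem.List.slice highs (some (i - pw)) (some (i + pw + 1))) (fun y => y)).getD 0
     let window_low := (PySem.List.min? (PySem.List.slice lows (some (i - pw)) (some (i + pw + 1))) (fun y => y)).getD 0
     let acc := if PySem.List.pyGetD highs i 0 = window_high then acc ++ [(("HH" : String), i, PySem.List.pyGetD highs i 0)] else acc
     if PySem.List.pyGetD lows i 0 = window_low then acc ++ [(("LL" : String), i, PySem.List.pyGetD lows i 0)] else acc)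
    = acc ++ dbosE highs lows pw i := by
  simp only [dbosE]
  split_ifs <;> simp

-- A's foldl builds acc ++ flatMap of the per-index events
theorem dbosFoldl (highs lows : List Int) (pw : Int) (L : List Int) (acc : List (String × Int × Int)) :
    L.foldl
      (fun acc i =>
        let window_high := (PySem.List.max? (PySem.List.slice highs (some (i - pw)) (some (i + pw + 1))) (fun y => y)).getD 0
        let window_low := (PySem.List.min? (PySem.List.slice lows (some (i - pw)) (some (i + pw + 1))) (fun y => y)).getD 0
        let acc := if PySem.List.pyGetD highs i 0 = window_high then acc ++ [(("HH" : String), i, PySem.List.pyGetD highs i 0)] else acc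
        if PySem.List.pyGetD lows i 0 = window_low then acc ++ [(("LL" : String), i, PySem.List.pyGetD lows i 0)] else acc)
      acc
    = acc ++ L.flatMap (dbosE highs lows pw) := by
  induction L generalizing acc with
  | nil => simp
  | cons i rest ih =>
      rw [List.foldl_cons, List.flatMap_cons, dbosStep, ih, List.append_assoc]

-- A's tail (len>=2 check plus s[-2]/s[-1]) equals dbosH on the reversed tag list
theorem dbosTail (s : List (String × Int × Int)) :
    (if 2 ≤ s.length then
      if (PySem.List.pyGetD s (-2) ("", 0, 0)).1 = "HH" ∧ (PySem.List.pyGetD s (-1) ("", 0, 0)).1 = "LL" then some "CHoCH"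
      else if (PySem.List.pyGetD s (-2) ("", 0, 0)).1 = "LL" ∧ (PySem.List.pyGetD s (-1) ("", 0, 0)).1 = "HH" then some "BOS"
      else none
     else none)
    = dbosH ((s.map (·.1)).reverse) := by
  rcases hr : (s.map (·.1)).reverse with _ | ⟨c, cs⟩
  · have h0 : s.map (·.1) = [] := by
      have := congrArg List.reverse hr
      simpa using this
    have : s = [] := List.eq_nil_of_map_eq_nil h0
    subst this; simp [dbosH]
  · rcases cs with _ | ⟨p, rest⟩
    · have hs : s.length = 1 := by
        have := congrArg List.length hr
        simpa using this
      rw [hr]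
      simp [dbosH, dbosH2, hs]
    · have hmap : s.map (·.1) = rest.reverse ++ [p, c] := by
        have := congrArg List.reverse hr
        simpa using this
      have hlen : s.length = rest.length + 2 := by
        have := congrArg List.length hmap
        simp at this
        omega
      have h2 : 2 ≤ s.length := by omega
      rw [if_pos h2]
      have hgm1 : PySem.List.pyGetD s (-1) ("", 0, 0) = s[s.length - 1]'(by omega) := by
        rw [PySem.List.pyGetD_neg_ofNat s 1 ("", 0, 0) (by omega) (by omega)]
      have hgm2 : PySem.List.pyGetD s (-2) ("", 0, 0) = s[s.length - 2]'(by omega) := by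
        rw [PySem.List.pyGetD_neg_ofNat s 2 ("", 0, 0) (by omega) (by omega)]
      have hc : (s[s.length - 1]'(by omega)).1 = c := by
        have h := congrArg (fun l => l[s.length - 1]?) hmap
        simp only [List.getElem?_map] at h
        rw [List.getElem?_append_right (by simp; omega)] at h
        have hidx : s.length - 1 - rest.reverse.length = 1 := by simp; omega
        rw [hidx] at h
        rw [List.getElem?_eq_getElem (by omega : s.length - 1 < s.length)] at h
        simp at h
        exact h
      have hp : (s[s.length - 2]'(by omega)).1 = p := by
        have h := congrArg (fun l => l[s.length - 2]?) hmap
        simp only [List.getElem?_map] at h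
        rw [List.getElem?_append_right (by simp; omega)] at h
        have hidx : s.length - 2 - rest.reverse.length = 0 := by simp; omega
        rw [hidx] at h
        rw [List.getElem?_eq_getElem (by omega : s.length - 2 < s.length)] at h
        simp at h
        exact h
      rw [hr]
      simp only [hgm1, hgm2, hc, hp, dbosH, dbosH2]

-- pivot-test equivalences: v = max(s) iff every element of s is ≤ v, given v ∈ s
theorem dbosMaxIff (s : List Int) (v : Int) (hv : v ∈ s) :
    (v = (PySem.List.max? s (fun y => y)).getD 0) ↔ (s.all (fun x => x ≤ v) = true) := by
  rcases hm : PySem.List.max? s (fun y => y) with _ | m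
  · exact absurd ((PySem.List.max?_eq_none_iff _ _).mp hm) (List.ne_nil_of_mem hv)
  · simp only [Option.getD_some, List.all_eq_true, decide_eq_true_eq]
    constructor
    · rintro rfl x hx
      exact PySem.List.max?_isMax hm x hx
    · intro hall
      have h1 : m ≤ v := hall m (PySem.List.max?_mem hm)
      have h2 : v ≤ m := PySem.List.max?_isMax hm v hv
      omega

theorem dbosMinIff (s : List Int) (v : Int) (hv : v ∈ s) :
    (v = (PySem.List.min? s (fun y => y)).getD 0) ↔ (s.all (fun x => v ≤ x) = true) := by
  rcases hm : PySem.List.min? s (fun y => y) with _ | m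
  · exact absurd ((PySem.List.min?_eq_none_iff _ _).mp hm) (List.ne_nil_of_mem hv)
  · simp only [Option.getD_some, List.all_eq_true, decide_eq_true_eq]
    constructor
    · rintro rfl x hx
      exact PySem.List.min?_isMin hm x hx
    · intro hall
      have h1 : v ≤ m := hall m (PySem.List.min?_mem hm)
      have h2 : m ≤ v := PySem.List.min?_isMin hm v hv
      omega

-- xs[i] is a member of the window slice xs[i-pw : i+pw+1] when indices are in range
theorem dbosMemSlice (xs : List Int) (pw i : Int) (hpw : 0 ≤ pw) (hlo : pw ≤ i)
    (hhi : i < (xs.length : Int)) :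
    PySem.List.pyGetD xs i 0 ∈ PySem.List.slice xs (some (i - pw)) (some (i + pw + 1)) := by
  rw [PySem.List.slice_toNat xs (a := i - pw) (b := i + pw + 1) (by omega) (by omega)]
  have hi0 : 0 ≤ i := by omega
  rw [PySem.List.pyGetD_eq_getElem xs 0 hi0 (by omega)]
  have hkey : (List.take ((i + pw + 1).toNat - (i - pw).toNat) (List.drop (i - pw).toNat xs))[pw.toNat]'(by
      simp [List.length_take, List.length_drop]; omega) = xs[i.toNat]'(by omega) := by
    rw [List.getElem_take, List.getElem_drop]
    congr 1
    omega
  rw [← hkey]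
  exact List.getElem_mem _

-- per-index tags agree (reversed) for every index the loop visits, under Pre_
theorem dbosTagsAgree (highs lows : List Int) (pw i : Int) (hpw : 0 ≤ pw)
    (hlo : pw ≤ i) (hhiH : i < (highs.length : Int)) (hhiL : i < (lows.length : Int)) :
    ((dbosE highs lows pw i).map (·.1)).reverse = dbosT highs lows pw i := by
  have hmemH := dbosMemSlice highs pw i hpw hlo hhiH
  have hmemL := dbosMemSlice lows pw i hpw hlo hhiL
  simp only [dbosE, dbosT, dbosMaxIff _ _ hmemH, dbosMinIff _ _ hmemL]
  split_ifs <;> simp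

theorem dbosFlatMapCongr {α β : Type} (L : List α) (f g : α → List β)
    (h : ∀ x ∈ L, f x = g x) : L.flatMap f = L.flatMap g := by
  induction L with
  | nil => rfl
  | cons a t ih =>
      rw [List.flatMap_cons, List.flatMap_cons, h a (by simp), ih (fun x hx => h x (by simp [hx]))]

-- ===== VERDICT (by name: the statement is the Claim_ definition above) =====
theorem detect_break_of_structure_spec : Claim_equal_detect_break_of_structure := by
  intro highs lows pw _hdom hpre
  obtain ⟨hpw, hlen⟩ := hpre
  unfold Spec_detect_break_of_structure detect_break_of_structure detect_break_of_structure_alt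
  rw [dbosFoldl, dbosGo_none, List.nil_append, dbosTail]
  congr 1
  rw [List.map_flatMap, List.reverse_flatMap]
  apply dbosFlatMapCongr
  intro i hi
  have hmem : i ∈ PySem.List.pyRange pw ((highs.length : Int) - pw) 1 := by
    rwa [List.mem_reverse] at hi
  rw [PySem.List.mem_pyRange_one] at hmem
  obtain ⟨h1, h2⟩ := hmem
  exact dbosTagsAgree highs lows pw i hpw h1 (by omega) (by omega)
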